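-- pv_equiv track=rewrite | github.com/Valentin387/ML_Translator | main.py | instruction_R
-- ===== SOURCE A (Python) =====
-- def instruction_R(func7,rs2,rs1,func3,rd,opcode):
--     instruction=[]
--     cont=0
--     while cont < 7:
--         instruction.append(opcode[-1])
--         opcode=opcode[:-1]
--         cont+=1
--     while cont < 12:
--         if (not rd):
--             instruction.append('0')
--         elif(rd[-1]=='b'):
--             instruction.append('0')
--         else:
--             instruction.append(rd[-1])
--         rd=rd[:-1]
--         cont+=1
--     while cont < 15:
--         instruction.append(func3[-1])
--         func3=func3[:-1]
--         cont+=1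
--     while cont < 20:
--         if (not rs1):
--             instruction.append('0')
--         elif(rs1[-1]=='b'):
--             instruction.append('0')
--         else:
--             instruction.append(rs1[-1])
--         rs1=rs1[:-1]
--         cont+=1
--     while cont < 25:
--         if (not rs2):
--             instruction.append('0')
--         elif(rs2[-1]=='b'):
--             instruction.append('0')
--         else:
--             instruction.append(rs2[-1])
--         rs2=rs2[:-1]
--         cont+=1
--     while cont < 32:
--         instruction.append(func7[-1])
--         func7=func7[:-1]
--         cont+=1
--     return instruction
-- ===== SOURCE B (Python) =====
-- def instruction_R(func7, rs2, rs1, func3, rd, opcode):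
--     def strict(f, w):
--         return [f[-1 - i] for i in range(w)]
--
--     def padded(f, w):
--         return ['0' if i >= len(f) or f[-1 - i] == 'b' else f[-1 - i]
--                 for i in range(w)]
--
--     return (strict(opcode, 7) + padded(rd, 5) + strict(func3, 3)
--             + padded(rs1, 5) + padded(rs2, 5) + strict(func7, 7))
-- ===== Notes on version B (the rewrite author's own statement) =====
-- stated objective: simpler
-- what changed: Replaces the single 32-step counter-driven while-loop chain with destructive slicing by two small per-field helpers (strict/padded comprehensions over direct reverse indices) whose results are concatenated.
import Mathlib
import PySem

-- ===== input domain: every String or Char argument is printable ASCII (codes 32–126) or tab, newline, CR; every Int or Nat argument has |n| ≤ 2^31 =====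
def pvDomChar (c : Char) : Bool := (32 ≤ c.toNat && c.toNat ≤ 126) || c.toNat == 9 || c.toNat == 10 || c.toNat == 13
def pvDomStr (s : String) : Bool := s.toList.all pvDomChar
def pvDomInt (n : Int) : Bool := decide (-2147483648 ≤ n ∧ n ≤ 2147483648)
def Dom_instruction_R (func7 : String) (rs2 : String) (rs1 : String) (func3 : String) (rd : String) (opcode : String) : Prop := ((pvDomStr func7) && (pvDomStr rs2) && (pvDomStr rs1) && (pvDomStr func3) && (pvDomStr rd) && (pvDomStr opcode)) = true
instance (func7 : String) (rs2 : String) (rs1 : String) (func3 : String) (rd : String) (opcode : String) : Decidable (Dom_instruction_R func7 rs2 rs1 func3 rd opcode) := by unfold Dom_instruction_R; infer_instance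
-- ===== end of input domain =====

-- B replaces A's 32-step counter loop with destructive slicing by per-field
-- strict/padded reverse-index comprehensions, concatenated (objective: simpler).

-- ===== PORT A =====
-- one iteration's appended element for the strict loops: instruction.append(f[-1])
-- (the 'none' arm is where Python raises IndexError; Pre_ excludes those inputs)
def aStrictElem (f : List Char) : String :=
  match PySem.List.pyGet? f (-1) with
  | some c => String.ofList [c]
  | none => "0"

-- strict while-loop: append f[-1]; f = f[:-1]; cont += 1   (opcode/func3/func7)
def aStrictLoop : Nat → List Char → List String → List String
  | 0, _, acc => acc
  | n+1, f, acc =>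
      aStrictLoop n (PySem.List.slice f none (some (-1))) (acc ++ [aStrictElem f])

-- one iteration's element for the guarded loops (rd/rs1/rs2)
def aPaddedElem (f : List Char) : String :=
  if f = [] then "0"
  else
    match PySem.List.pyGet? f (-1) with
    | some c => if c = 'b' then "0" else String.ofList [c]
    | none => "0"

def aPaddedLoop : Nat → List Char → List String → List String
  | 0, _, acc => acc
  | n+1, f, acc =>
      aPaddedLoop n (PySem.List.slice f none (some (-1))) (acc ++ [aPaddedElem f])

def instruction_R (func7 : String) (rs2 : String) (rs1 : String) (func3 : String) (rd : String) (opcode : String) : List String :=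
  let i1 := aStrictLoop 7 opcode.toList []       -- cont 0..6
  let i2 := aPaddedLoop 5 rd.toList i1           -- cont 7..11
  let i3 := aStrictLoop 3 func3.toList i2        -- cont 12..14
  let i4 := aPaddedLoop 5 rs1.toList i3          -- cont 15..19
  let i5 := aPaddedLoop 5 rs2.toList i4          -- cont 20..24
  aStrictLoop 7 func7.toList i5                  -- cont 25..31

-- ===== PORT B =====
-- strict(f, w) = [f[-1-i] for i in range(w)]  ('none' arm = Python IndexError, outside Pre_)
def bStrictElem (f : List Char) (i : Nat) : String :=
  match PySem.List.pyGet? f (-1 - (i : Int)) with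
  | some c => String.ofList [c]
  | none => "0"

def bStrict (f : List Char) (w : Nat) : List String :=
  (List.range w).map (bStrictElem f)

-- padded(f, w) = ['0' if i >= len(f) or f[-1-i] == 'b' else f[-1-i] for i in range(w)]
def bPaddedElem (f : List Char) (i : Nat) : String :=
  if f.length ≤ i then "0"
  else
    match PySem.List.pyGet? f (-1 - (i : Int)) with
    | some c => if c = 'b' then "0" else String.ofList [c]
    | none => "0"

def bPadded (f : List Char) (w : Nat) : List String :=
  (List.range w).map (bPaddedElem f)

def instruction_R_alt (func7 : String) (rs2 : String) (rs1 : String) (func3 : String) (rd : String) (opcode : String) : List String :=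
  bStrict opcode.toList 7 ++ bPadded rd.toList 5 ++ bStrict func3.toList 3
    ++ bPadded rs1.toList 5 ++ bPadded rs2.toList 5 ++ bStrict func7.toList 7

-- ===== PRECONDITION & SPEC =====
-- Pre_ excludes exactly the inputs where Python A raises IndexError: the three
-- unguarded fields opcode/func3/func7 must be at least as long as their widths.
def Pre_instruction_R (func7 : String) (rs2 : String) (rs1 : String) (func3 : String) (rd : String) (opcode : String) : Prop :=
  7 ≤ opcode.toList.length ∧ 3 ≤ func3.toList.length ∧ 7 ≤ func7.toList.length

instance (func7 : String) (rs2 : String) (rs1 : String) (func3 : String) (rd : String) (opcode : String) : Decidable (Pre_instruction_R func7 rs2 rs1 func3 rd opcode) := by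
  unfold Pre_instruction_R; infer_instance

def pvWitness_instruction_R : String × String × String × String × String × String :=
  ("0000000", "00b10", "01100", "000", "b0101", "0110011")

def Spec_instruction_R (func7 : String) (rs2 : String) (rs1 : String) (func3 : String) (rd : String) (opcode : String) (out : List String) : Prop := out = instruction_R_alt func7 rs2 rs1 func3 rd opcode
instance (func7 : String) (rs2 : String) (rs1 : String) (func3 : String) (rd : String) (opcode : String) (out : List String) : Decidable (Spec_instruction_R func7 rs2 rs1 func3 rd opcode out) := by unfold Spec_instruction_R; infer_instance

-- ===== CLAIM (what is proved, stated in full; the proofs are below) =====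
def Claim_equal_instruction_R : Prop := ∀ (func7 : String) (rs2 : String) (rs1 : String) (func3 : String) (rd : String) (opcode : String), Dom_instruction_R func7 rs2 rs1 func3 rd opcode → Pre_instruction_R func7 rs2 rs1 func3 rd opcode → Spec_instruction_R func7 rs2 rs1 func3 rd opcode (instruction_R func7 rs2 rs1 func3 rd opcode)

-- ===== LEMMAS AND PROOFS =====

-- reverse indexing commutes with dropping the last element
lemma pyGet?_neg_dropLast (f : List Char) (i : Nat) :
    PySem.List.pyGet? f.dropLast (-1 - (i : Int)) = PySem.List.pyGet? f (-1 - ((i : Int) + 1)) := by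
  have h1 : (-1 - (i : Int)) = -((i + 1 : Nat) : Int) := by push_cast; ring
  have h2 : (-1 - ((i : Int) + 1)) = -((i + 2 : Nat) : Int) := by push_cast; ring
  rw [h1, h2]
  have hdl : f.dropLast.length = f.length - 1 := List.length_dropLast
  by_cases h : i + 2 ≤ f.length
  · rw [PySem.List.pyGet?_neg_natCast _ _ (by omega) (by omega),
        PySem.List.pyGet?_neg_natCast _ _ (by omega) h]
    have hidx : f.dropLast.length - (i + 1) = f.length - (i + 2) := by omega
    rw [hidx, List.getElem?_eq_getElem (by omega : f.length - (i + 2) < f.dropLast.length),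
        List.getElem?_eq_getElem (by omega : f.length - (i + 2) < f.length)]
    simp [List.getElem_dropLast]
  · rw [(PySem.List.pyGet?_eq_none_iff _ _).2, (PySem.List.pyGet?_eq_none_iff _ _).2]
    · intro hr
      rcases hr with ⟨hlo, _⟩
      omega
    · intro hr
      rcases hr with ⟨hlo, _⟩
      omega

lemma bStrictElem_shift (f : List Char) (i : Nat) :
    bStrictElem f.dropLast i = bStrictElem f (i + 1) := by
  unfold bStrictElem
  rw [pyGet?_neg_dropLast]
  norm_num

lemma bPaddedElem_shift (f : List Char) (i : Nat) :
    bPaddedElem f.dropLast i = bPaddedElem f (i + 1) := by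
  unfold bPaddedElem
  rw [pyGet?_neg_dropLast]
  have hdl : f.dropLast.length = f.length - 1 := List.length_dropLast
  have h : (f.dropLast.length ≤ i) = (f.length ≤ i + 1) := propext ⟨fun _ => by omega, fun _ => by omega⟩
  simp only [h]
  norm_num

lemma bStrict_succ (f : List Char) (n : Nat) :
    bStrict f (n + 1) = bStrictElem f 0 :: bStrict f.dropLast n := by
  unfold bStrict
  rw [List.range_succ_eq_map, List.map_cons, List.map_map]
  congr 1
  apply List.map_congr_left
  intro i _
  simp only [Function.comp_apply]
  exact (bStrictElem_shift f i).symm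

lemma bPadded_succ (f : List Char) (n : Nat) :
    bPadded f (n + 1) = bPaddedElem f 0 :: bPadded f.dropLast n := by
  unfold bPadded
  rw [List.range_succ_eq_map, List.map_cons, List.map_map]
  congr 1
  apply List.map_congr_left
  intro i _
  simp only [Function.comp_apply]
  exact (bPaddedElem_shift f i).symm

lemma aStrictElem_eq (f : List Char) : aStrictElem f = bStrictElem f 0 := by
  unfold aStrictElem bStrictElem
  norm_num

lemma aPaddedElem_eq (f : List Char) : aPaddedElem f = bPaddedElem f 0 := by
  unfold aPaddedElem bPaddedElem
  simp only [show (f.length ≤ 0) = (f = []) from propext (by simp [List.length_eq_zero_iff])]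
  norm_num

lemma aStrictLoop_eq (n : Nat) (f : List Char) (acc : List String) :
    aStrictLoop n f acc = acc ++ bStrict f n := by
  induction n generalizing f acc with
  | zero => simp [aStrictLoop, bStrict]
  | succ n ih =>
      rw [aStrictLoop, PySem.List.slice_to_neg_one, ih, bStrict_succ, aStrictElem_eq]
      simp

lemma aPaddedLoop_eq (n : Nat) (f : List Char) (acc : List String) :
    aPaddedLoop n f acc = acc ++ bPadded f n := by
  induction n generalizing f acc with
  | zero => simp [aPaddedLoop, bPadded]
  | succ n ih =>
      rw [aPaddedLoop, PySem.List.slice_to_neg_one, ih, bPadded_succ, aPaddedElem_eq]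
      simp

-- ===== VERDICT (by name: the statement is the Claim_ definition above) =====
theorem instruction_R_spec : Claim_equal_instruction_R := by
  intro func7 rs2 rs1 func3 rd opcode _ _
  unfold Spec_instruction_R instruction_R instruction_R_alt
  simp only [aStrictLoop_eq, aPaddedLoop_eq]
  simp [List.append_assoc]
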